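-- pv_equiv track=rewrite | github.com/lvah/201901python | day14/14_2048雏形.py | is_row_left
-- ===== SOURCE A (Python) =====
-- def is_row_left(row):  # [0, 2,2,0]
--     # 任意两个元素可以向左移动？
--     def is_change(index):  # index时索引值， [0,1,2,3]
--         # - 如果第一个数值为0， 第二个数值不为0， 则说明可以向左移动；
--         if row[index] == 0 and row[index + 1] != 0:
--             return True
--         # - 如果第一个数值不为0， 第二个数值与第一个元素相等， 则说明可以向左移动；
--         if row[index] != 0 and row[index + 1] == row[index]:
--             return True
--         return False
--
--     # 只要这一行的任意两个元素可以向左移动， 则返回True;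
--     return any([is_change(index) for index in range(3)])
-- ===== SOURCE B (Python) =====
-- def is_row_left(row):
--     cells = [row[0], row[1], row[2], row[3]]
--     nz = [x for x in cells if x != 0]
--     merged = []
--     i = 0
--     while i < len(nz):
--         if i + 1 < len(nz) and nz[i] == nz[i + 1]:
--             merged.append(nz[i] * 2)
--             i += 2
--         else:
--             merged.append(nz[i])
--             i += 1
--     merged += [0] * (4 - len(merged))
--     return merged != cells
-- ===== Notes on version B (the rewrite author's own statement) =====
-- stated objective: alternative
-- what changed: B simulates the actual 2048 left move on the first four cells (drop zeros, merge equal adjacent pairs left-to-right, re-pad with zeros) and returns whether the result differs from the original four cells, instead of A's scan of the three adjacent index pairs for a local shiftable condition.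
import Mathlib
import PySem

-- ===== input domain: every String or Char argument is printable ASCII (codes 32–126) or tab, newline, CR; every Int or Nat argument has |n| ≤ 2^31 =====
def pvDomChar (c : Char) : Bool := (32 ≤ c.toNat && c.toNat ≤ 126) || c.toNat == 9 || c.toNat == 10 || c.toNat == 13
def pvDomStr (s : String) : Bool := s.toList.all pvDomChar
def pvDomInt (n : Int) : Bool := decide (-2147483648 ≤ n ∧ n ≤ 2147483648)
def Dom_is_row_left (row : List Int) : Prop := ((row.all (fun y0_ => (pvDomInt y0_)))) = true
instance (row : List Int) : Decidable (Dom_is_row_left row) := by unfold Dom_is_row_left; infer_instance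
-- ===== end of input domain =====

-- B simulates the 2048 left move on the first four cells (drop zeros, merge equal adjacent pairs,
-- re-pad) and compares with the originals, instead of A's scan of the three adjacent index pairs
-- for a local shiftable condition (objective: alternative).

-- ===== PORT A =====
-- inner helper is_change(index); row[index] is total under Pre_ (length ≥ 4, indices 0..3)
def pv_is_change (row : List Int) (index : Int) : Bool :=
  if PySem.List.pyGetD row index 0 = 0 ∧ PySem.List.pyGetD row (index + 1) 0 ≠ 0 then true
  else if PySem.List.pyGetD row index 0 ≠ 0 ∧
          PySem.List.pyGetD row (index + 1) 0 = PySem.List.pyGetD row index 0 then true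
  else false

def is_row_left (row : List Int) : Bool :=
  ((PySem.List.pyRange 0 3 1).map (fun index => pv_is_change row index)).any id

-- ===== PORT B =====
-- Source B's while loop: merge equal adjacent values of the zero-free sequence, left to right
def pv_merge : List Int → List Int
  | [] => []
  | [x] => [x]
  | x :: y :: rest => if x = y then (x * 2) :: pv_merge rest else x :: pv_merge (y :: rest)

def is_row_left_alt (row : List Int) : Bool :=
  let cells : List Int :=
    [PySem.List.pyGetD row 0 0, PySem.List.pyGetD row 1 0,
     PySem.List.pyGetD row 2 0, PySem.List.pyGetD row 3 0]
  let nz := cells.filter (fun x => decide (x ≠ 0))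
  let merged := pv_merge nz
  let merged := merged ++ List.replicate (4 - merged.length) 0
  decide (merged ≠ cells)

-- ===== PRECONDITION & SPEC =====
-- A raises IndexError (row[3]) on rows shorter than 4; exactly those inputs are excluded.
def Pre_is_row_left (row : List Int) : Prop := 4 ≤ row.length
instance (row : List Int) : Decidable (Pre_is_row_left row) := by unfold Pre_is_row_left; infer_instance
def pvWitness_is_row_left : List Int := [0, 2, 2, 0]

def Spec_is_row_left (row : List Int) (out : Bool) : Prop := out = is_row_left_alt row
instance (row : List Int) (out : Bool) : Decidable (Spec_is_row_left row out) := by unfold Spec_is_row_left; infer_instance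

-- ===== CLAIM (what is proved, stated in full; the proofs are below) =====
def Claim_equal_is_row_left : Prop := ∀ (row : List Int), Dom_is_row_left row → Pre_is_row_left row → Spec_is_row_left row (is_row_left row)

-- ===== LEMMAS AND PROOFS =====

-- the whole claim reduced to the first four cells: exhaustive case analysis on which cells are
-- zero and which pairs of cells are equal
set_option maxHeartbeats 4000000 in
theorem pv_core (a b c d : Int) (t : List Int) :
    is_row_left (a :: b :: c :: d :: t) = is_row_left_alt (a :: b :: c :: d :: t) := by
  have hr : PySem.List.pyRange 0 3 1 = [0, 1, 2] := by decide
  simp only [is_row_left, is_row_left_alt, pv_is_change, hr, List.map_cons, List.map_nil]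
  norm_num [PySem.List.pyGetD_ofNat']
  by_cases ha : a = 0 <;> by_cases hb : b = 0 <;> by_cases hc : c = 0 <;> by_cases hd : d = 0 <;>
    by_cases hab : a = b <;> by_cases hac : a = c <;> by_cases had : a = d <;>
    by_cases hbc : b = c <;> by_cases hbd : b = d <;> by_cases hcd : c = d <;>
    subst_vars <;> (try simp_all [pv_merge, List.filter]) <;> (try omega)

-- ===== VERDICT (by name: the statement is the Claim_ definition above) =====
theorem is_row_left_spec : Claim_equal_is_row_left := by
  intro row _ hpre
  match row, hpre with
  | a :: b :: c :: d :: t, _ =>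
    show is_row_left _ = is_row_left_alt _
    exact pv_core a b c d t
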